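-- pv_equiv track=rewrite | github.com/mrellash86/monthly-rainfall-analyzer | AshEll_Program7.py | find_min_max_months
-- ===== SOURCE A (Python) =====
-- def find_min_max_months(rainfall_list, month_names):
--
--     if not rainfall_list:
--         return [], []
--
--     min_rainfall = min(rainfall_list)
--     max_rainfall = max(rainfall_list)
--
--     min_months = []
--     max_months = []
--
--
--     for i in range(len(rainfall_list)):
--         if rainfall_list[i] == min_rainfall:
--             min_months.append(month_names[i])
--
--         if rainfall_list[i] == max_rainfall:
--             max_months.append(month_names[i])
--     return min_months, max_months
-- ===== SOURCE B (Python) =====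
-- def find_min_max_months(rainfall_list, month_names):
--     if not rainfall_list:
--         return [], []
--     running_min = running_max = rainfall_list[0]
--     min_months = [month_names[0]]
--     max_months = [month_names[0]]
--     for value, name in zip(rainfall_list[1:], month_names[1:]):
--         if value < running_min:
--             running_min = value
--             min_months = [name]
--         elif value == running_min:
--             min_months.append(name)
--         if value > running_max:
--             running_max = value
--             max_months = [name]
--         elif value == running_max:
--             max_months.append(name)
--     return min_months, max_months
-- ===== Notes on version B (the rewrite author's own statement) =====
-- stated objective: alternative
-- what changed: Single pass maintaining running min/max and their month lists seeded from the first element, instead of computing min and max first and then a second indexed collection loop.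
-- outside the precondition, e.g. on find_min_max_months([1, 5, 3], ['Jan', 'Feb']): A returns (['Jan'], ['Feb']), B returns (['Jan'], ['Feb'])
import Mathlib
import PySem

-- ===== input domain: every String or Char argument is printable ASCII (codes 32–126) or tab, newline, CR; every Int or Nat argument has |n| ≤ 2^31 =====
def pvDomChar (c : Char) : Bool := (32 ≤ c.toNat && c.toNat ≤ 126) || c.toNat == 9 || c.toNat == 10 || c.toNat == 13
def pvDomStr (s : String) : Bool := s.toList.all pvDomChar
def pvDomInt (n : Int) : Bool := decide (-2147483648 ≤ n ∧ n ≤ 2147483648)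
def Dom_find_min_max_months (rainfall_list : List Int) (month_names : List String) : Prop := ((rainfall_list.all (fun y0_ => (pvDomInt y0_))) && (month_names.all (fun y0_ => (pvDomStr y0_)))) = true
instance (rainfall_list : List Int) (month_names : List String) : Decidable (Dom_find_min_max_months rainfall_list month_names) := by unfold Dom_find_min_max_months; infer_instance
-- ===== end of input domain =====

set_option maxRecDepth 8192


-- B replaces A's min/max passes plus indexed collection loop by ONE pass with running
-- extrema seeded from the first element (objective: alternative decomposition, same cost).

-- ===== PORT A =====
-- literal transliteration of A: empty guard, min/max of the list, then a loop over
-- range(len(rainfall_list)) appending month_names[i] on equality with min / with max.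
def find_min_max_months (rainfall_list : List Int) (month_names : List String) : List String × List String :=
  match rainfall_list with
  | [] => ([], [])
  | r :: rest =>
    let min_rainfall : Int := rest.foldl min r
    let max_rainfall : Int := rest.foldl max r
    (List.range (r :: rest).length).foldl
      (fun acc (i : Nat) =>
        let acc1 := if PySem.List.pyGetD (r :: rest) (i : Int) 0 = min_rainfall
                    then (acc.1 ++ [PySem.List.pyGetD month_names (i : Int) ""], acc.2) else acc
        if PySem.List.pyGetD (r :: rest) (i : Int) 0 = max_rainfall
        then (acc1.1, acc1.2 ++ [PySem.List.pyGetD month_names (i : Int) ""]) else acc1)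
      ([], [])

-- ===== PORT B =====
-- B's loop body: running (min, its months, max, its months) over the zipped tail.
def pvBLoop : List (Int × String) → Int → List String → Int → List String → List String × List String
  | [], _, min_months, _, max_months => (min_months, max_months)
  | (value, name) :: t, rmin, min_months, rmax, max_months =>
    let p1 := if value < rmin then (value, [name])
              else if value = rmin then (rmin, min_months ++ [name])
              else (rmin, min_months)
    let p2 := if value > rmax then (value, [name])
              else if value = rmax then (rmax, max_months ++ [name])
              else (rmax, max_months)
    pvBLoop t p1.1 p1.2 p2.1 p2.2

def find_min_max_months_alt (rainfall_list : List Int) (month_names : List String) : List String × List String :=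
  match rainfall_list, month_names with
  | r :: rtl, m :: mtl => pvBLoop (rtl.zip mtl) r [m] r [m]
  | _, _ => ([], [])

-- ===== PRECONDITION & SPEC =====
-- Pre_ excludes inputs with fewer month names than rainfall values: there A raises
-- IndexError as soon as an unnamed value is extremal, and returns only by accident when
-- every unnamed value is non-extremal (B's zip then truncates and happens to agree).
def Pre_find_min_max_months (rainfall_list : List Int) (month_names : List String) : Prop :=
  rainfall_list.length ≤ month_names.length
instance (rainfall_list : List Int) (month_names : List String) : Decidable (Pre_find_min_max_months rainfall_list month_names) := by unfold Pre_find_min_max_months; infer_instance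
def pvWitness_find_min_max_months : List Int × List String := ([3, 1, 1, 5], ["Jan", "Feb", "Mar", "Apr"])
def Spec_find_min_max_months (rainfall_list : List Int) (month_names : List String) (out : List String × List String) : Prop := out = find_min_max_months_alt rainfall_list month_names
instance (rainfall_list : List Int) (month_names : List String) (out : List String × List String) : Decidable (Spec_find_min_max_months rainfall_list month_names out) := by unfold Spec_find_min_max_months; infer_instance

-- ===== CLAIM (what is proved, stated in full; the proofs are below) =====
def Claim_equal_find_min_max_months : Prop := ∀ (rainfall_list : List Int) (month_names : List String), Dom_find_min_max_months rainfall_list month_names → Pre_find_min_max_months rainfall_list month_names → Spec_find_min_max_months rainfall_list month_names (find_min_max_months rainfall_list month_names)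

-- ===== LEMMAS AND PROOFS =====

-- names of the pairs whose value equals m, in order (used as the common reference)
def pvMins (ps : List (Int × String)) (m : Int) : List String :=
  (ps.filter (fun q => q.1 = m)).map Prod.snd

lemma pvMins_nil (m : Int) : pvMins [] m = [] := rfl

lemma pvMins_cons (v : Int) (n : String) (t : List (Int × String)) (m : Int) :
    pvMins ((v, n) :: t) m = (if v = m then [n] else []) ++ pvMins t m := by
  by_cases h : v = m <;> simp [pvMins, h]

lemma pvMins_append (xs ys : List (Int × String)) (m : Int) :
    pvMins (xs ++ ys) m = pvMins xs m ++ pvMins ys m := by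
  simp [pvMins]

lemma pfold_min_le (t : List (Int × String)) : ∀ a : Int, t.foldl (fun x q => min x q.1) a ≤ a := by
  induction t with
  | nil => intro a; simp
  | cons v t ih => intro a; exact le_trans (ih (min a v.1)) (min_le_left a v.1)

lemma pfold_max_ge (t : List (Int × String)) : ∀ a : Int, a ≤ t.foldl (fun x q => max x q.1) a := by
  induction t with
  | nil => intro a; simp
  | cons v t ih => intro a; exact le_trans (le_max_left a v.1) (ih (max a v.1))

-- invariant of B's loop: the result is the (possibly discarded) carried months plus
-- the names of the remaining pairs that attain the overall extremum
lemma pvBLoop_eq (t : List (Int × String)) :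
    ∀ (rmin : Int) (mnm : List String) (rmax : Int) (mxm : List String),
    pvBLoop t rmin mnm rmax mxm =
      ((if t.foldl (fun a q => min a q.1) rmin < rmin then [] else mnm)
          ++ pvMins t (t.foldl (fun a q => min a q.1) rmin),
       (if rmax < t.foldl (fun a q => max a q.1) rmax then [] else mxm)
          ++ pvMins t (t.foldl (fun a q => max a q.1) rmax)) := by
  induction t with
  | nil => intro rmin mnm rmax mxm; simp [pvBLoop, pvMins]
  | cons p t ih =>
    obtain ⟨v, name⟩ := p
    intro rmin mnm rmax mxm
    simp only [pvBLoop, List.foldl_cons, pvMins_cons]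
    rw [ih]
    simp only [Prod.mk.injEq]
    constructor
    · -- min component
      rcases lt_trichotomy v rmin with h1 | h1 | h1
      · have e1 : min rmin v = v := min_eq_right h1.le
        rcases lt_or_eq_of_le (pfold_min_le t v) with hf | hf
        · have e2 : t.foldl (fun x q => min x q.1) v < rmin := lt_trans hf h1
          have e3 : ¬ v = t.foldl (fun x q => min x q.1) v := by omega
          simp [h1, e1, hf, e2, e3]
        · have e2 : ¬ t.foldl (fun x q => min x q.1) v < v := by omega
          have e3 : t.foldl (fun x q => min x q.1) v < rmin := by omega
          simp [h1, e1, hf]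
      · subst h1
        have e1 : min v v = v := min_self v
        rcases lt_or_eq_of_le (pfold_min_le t v) with hf | hf
        · have e3 : ¬ v = t.foldl (fun x q => min x q.1) v := by omega
          simp [hf, e3]
        · have e2 : ¬ t.foldl (fun x q => min x q.1) v < v := by omega
          simp [hf]
      · have hf := pfold_min_le t rmin
        have e0 : ¬ v < rmin := by omega
        have e0' : ¬ v = rmin := by omega
        have e1 : min rmin v = rmin := min_eq_left h1.le
        have e3 : ¬ v = t.foldl (fun x q => min x q.1) rmin := by omega
        simp [e0, e0', e1, e3]
    · -- max component
      rcases lt_trichotomy rmax v with h2 | h2 | h2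
      · have e1 : max rmax v = v := max_eq_right h2.le
        rcases lt_or_eq_of_le (pfold_max_ge t v) with hf | hf
        · have e2 : rmax < t.foldl (fun x q => max x q.1) v := lt_trans h2 hf
          have e3 : ¬ v = t.foldl (fun x q => max x q.1) v := by omega
          simp [h2, e1, hf, e2, e3]
        · have e2 : ¬ v < t.foldl (fun x q => max x q.1) v := by omega
          have e3 : rmax < t.foldl (fun x q => max x q.1) v := by omega
          simp [h2, e1, hf.symm]
      · subst h2
        have e1 : max rmax rmax = rmax := max_self rmax
        rcases lt_or_eq_of_le (pfold_max_ge t rmax) with hf | hf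
        · have e3 : ¬ rmax = t.foldl (fun x q => max x q.1) rmax := by omega
          simp [hf, e3]
        · have e2 : ¬ rmax < t.foldl (fun x q => max x q.1) rmax := by omega
          simp [hf.symm]
      · have hf := pfold_max_ge t rmax
        have e0 : ¬ rmax < v := by omega
        have e0' : ¬ v = rmax := by omega
        have e1 : max rmax v = rmax := max_eq_left h2.le
        have e3 : ¬ v = t.foldl (fun x q => max x q.1) rmax := by omega
        simp [e0, e0', e1, e3]

-- A's collection loop over range(len) equals pvMins of the zipped prefix
lemma pvALoop_eq (rs : List Int) (ms : List String) (mn mx : Int)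
    (h : rs.length ≤ ms.length) :
    ∀ n, n ≤ rs.length → ∀ acc1 acc2 : List String,
    (List.range n).foldl
      (fun acc (i : Nat) =>
        let acc1 := if PySem.List.pyGetD rs (i : Int) 0 = mn
                    then (acc.1 ++ [PySem.List.pyGetD ms (i : Int) ""], acc.2) else acc
        if PySem.List.pyGetD rs (i : Int) 0 = mx
        then (acc1.1, acc1.2 ++ [PySem.List.pyGetD ms (i : Int) ""]) else acc1)
      (acc1, acc2) =
      (acc1 ++ pvMins ((rs.zip ms).take n) mn, acc2 ++ pvMins ((rs.zip ms).take n) mx) := by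
  intro n
  induction n with
  | zero => intro _ acc1 acc2; simp [pvMins]
  | succ n ih =>
    intro hn acc1 acc2
    have hn' : n < rs.length := by omega
    have hm' : n < ms.length := by omega
    have hz : n < (rs.zip ms).length := by simp [List.length_zip]; omega
    rw [List.range_succ, List.foldl_append, ih (by omega)]
    have hget : PySem.List.pyGetD rs (n : Int) 0 = rs[n] := by
      rw [PySem.List.pyGetD_natCast]; exact List.getD_eq_getElem rs 0 hn'
    have hgetm : PySem.List.pyGetD ms (n : Int) "" = ms[n] := by
      rw [PySem.List.pyGetD_natCast]; exact List.getD_eq_getElem ms "" hm'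
    have htake : (rs.zip ms).take (n + 1) = (rs.zip ms).take n ++ [(rs[n], ms[n])] := by
      rw [List.take_add_one, List.getElem?_eq_getElem hz]
      simp [List.getElem_zip]
    rw [htake]
    simp only [pvMins_append, pvMins_cons, pvMins_nil, List.append_nil,
               List.foldl_cons, List.foldl_nil, hget, hgetm]
    by_cases h1 : rs[n] = mn <;> by_cases h2 : rs[n] = mx
    · have h3 : mn = mx := by omega
      simp [h1, h3, List.append_assoc]
    · have h3 : ¬ mn = mx := by omega
      simp [h1, h3, List.append_assoc]
    · have h4 : ¬ mx = mn := by omega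
      simp [h2, h4, List.append_assoc]
    · simp [h1, h2]

-- ===== VERDICT (by name: the statement is the Claim_ definition above) =====
theorem find_min_max_months_spec : Claim_equal_find_min_max_months := by
  intro rs ms _ hpre
  unfold Spec_find_min_max_months
  match rs, ms with
  | [], ms => rfl
  | r :: rest, [] =>
    exfalso; unfold Pre_find_min_max_months at hpre; simp at hpre
  | r :: rest, m :: mtl =>
    unfold Pre_find_min_max_months at hpre
    have hlen : rest.length ≤ mtl.length := by simp at hpre; omega
    have hzfull : ((r :: rest).zip (m :: mtl)).take (r :: rest).length
        = (r :: rest).zip (m :: mtl) :=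
      List.take_of_length_le (by simp [List.length_zip])
    have fmin : (rest.zip mtl).foldl (fun a q => min a q.1) r = rest.foldl min r := by
      rw [← List.foldl_map (f := Prod.fst) (g := min), List.map_fst_zip hlen]
    have fmax : (rest.zip mtl).foldl (fun a q => max a q.1) r = rest.foldl max r := by
      rw [← List.foldl_map (f := Prod.fst) (g := max), List.map_fst_zip hlen]
    have hminle : rest.foldl min r ≤ r := fmin ▸ pfold_min_le (rest.zip mtl) r
    have hmaxge : r ≤ rest.foldl max r := fmax ▸ pfold_max_ge (rest.zip mtl) r
    simp only [find_min_max_months, find_min_max_months_alt]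
    rw [pvALoop_eq (r :: rest) (m :: mtl) (rest.foldl min r) (rest.foldl max r) hpre
         (r :: rest).length (le_refl _) [] [], hzfull, pvBLoop_eq, fmin, fmax]
    simp only [List.zip_cons_cons, pvMins_cons, List.nil_append]
    refine Prod.ext ?_ ?_ <;> simp only []
    · rcases lt_or_eq_of_le hminle with hc | hc
      · simp [show ¬ r = rest.foldl min r by omega, show rest.foldl min r < r from hc]
      · simp [hc]
    · rcases lt_or_eq_of_le hmaxge with hc | hc
      · simp [show ¬ r = rest.foldl max r by omega, show r < rest.foldl max r from hc]
      · simp [hc.symm]
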